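-- pv_equiv track=rewrite | github.com/arun-p12/project-euler | p0001_p0050/p0035.py | circ_numbers
-- ===== SOURCE A (Python) =====
-- def circ_numbers(string):
--     ret_list = []
--     my_len = len(string)
--     for i in range(my_len):
--         my_str = string[i]
--         for j in range(1, my_len):
--             new_loc = ((i + j) % my_len)        # do the wrap around
--             my_str += string[new_loc]
--         ret_list.append(my_str)
--     return(ret_list)
-- ===== SOURCE B (Python) =====
-- def circ_numbers(string):
--     n = len(string)
--     doubled = string + string
--     return [doubled[i:i+n] for i in range(n)]
-- ===== Notes on version B (the rewrite author's own statement) =====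
-- stated objective: faster
-- what changed: Replaces the nested loop with per-character modular indexing and repeated string += by a single doubled = string + string and one contiguous slice doubled[i:i+n] per rotation.
import Mathlib
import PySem

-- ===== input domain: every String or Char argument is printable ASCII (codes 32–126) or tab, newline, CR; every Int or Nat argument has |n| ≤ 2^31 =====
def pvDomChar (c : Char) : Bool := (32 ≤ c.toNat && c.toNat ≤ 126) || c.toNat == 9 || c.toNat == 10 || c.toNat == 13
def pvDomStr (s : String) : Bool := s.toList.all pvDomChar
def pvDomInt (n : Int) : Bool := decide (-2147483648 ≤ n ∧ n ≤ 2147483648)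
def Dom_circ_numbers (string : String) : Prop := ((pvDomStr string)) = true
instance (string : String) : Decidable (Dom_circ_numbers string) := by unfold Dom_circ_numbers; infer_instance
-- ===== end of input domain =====

-- B replaces A's nested modular-indexing loop with one doubled string and a contiguous slice per rotation (simpler).


-- ===== PORT A =====
-- string[i] always hits in range here (indices are (i+j) % my_len with 0 ≤ i < my_len), so pyGetD with a dummy default is exact.
def circ_numbers (string : String) : List String :=
  let cs := string.toList
  let my_len := cs.length
  (PySem.List.pyRange 0 my_len 1).foldl (fun ret_list i =>
    let my_str : List Char := [PySem.List.pyGetD cs i ' ']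
    let my_str := (PySem.List.pyRange 1 my_len 1).foldl (fun my_str j =>
      let new_loc := PySem.Int.mod (i + j) my_len
      my_str ++ [PySem.List.pyGetD cs new_loc ' ']) my_str
    ret_list ++ [String.ofList my_str]) []

-- ===== PORT B =====
def circ_numbers_alt (string : String) : List String :=
  let cs := string.toList
  let n := cs.length
  let doubled := cs ++ cs
  (List.range n).map (fun (i : Nat) =>
    String.ofList (PySem.List.slice doubled (some (i : Int)) (some ((i : Int) + (n : Int)))))

-- ===== PRECONDITION & SPEC =====
def Spec_circ_numbers (string : String) (out : List String) : Prop := out = circ_numbers_alt string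
instance (string : String) (out : List String) : Decidable (Spec_circ_numbers string out) := by unfold Spec_circ_numbers; infer_instance

-- ===== CLAIM (what is proved, stated in full; the proofs are below) =====
def Claim_equal_circ_numbers : Prop := ∀ (string : String), Dom_circ_numbers string → Spec_circ_numbers string (circ_numbers string)

-- ===== LEMMAS AND PROOFS =====

-- A's inner loop for row i builds exactly the slice (cs++cs)[i : i+n].
lemma inner_eq (cs : List Char) (i : Nat) (hi : i < cs.length) :
    (PySem.List.pyRange 1 cs.length 1).foldl (fun my_str j =>
        my_str ++ [PySem.List.pyGetD cs (PySem.Int.mod ((i : Int) + j) cs.length) ' '])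
      [PySem.List.pyGetD cs (i : Int) ' ']
    = ((cs ++ cs).drop i).take cs.length := by
  rw [PySem.List.foldl_append_singleton_eq_map, PySem.List.pyRange_one, List.map_map]
  have hn1 : ((cs.length : Int) - 1).toNat = cs.length - 1 := by omega
  rw [hn1]
  apply List.ext_getElem
  · simp; omega
  · intro k hk1 hk2
    rw [List.getElem_take, List.getElem_drop]
    rcases k with _ | k
    · simp only [List.singleton_append, List.getElem_cons_zero, PySem.List.pyGetD_natCast]
      rw [List.getD_eq_getElem _ _ hi, List.getElem_append_left (by omega)]
      congr 1
    · have hk : k < cs.length - 1 := by simp at hk1; omega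
      have harith : ((fun j => PySem.List.pyGetD cs (PySem.Int.mod ((i:Int) + j) cs.length) ' ') ∘ fun m : Nat => (1:Int) + (m:Int)) k
          = cs.getD ((i + 1 + k) % cs.length) ' ' := by
        simp only [Function.comp]
        have : (i : Int) + (1 + (k : Int)) = ((i + 1 + k : Nat) : Int) := by push_cast; ring
        rw [this, PySem.Int.mod_natCast, PySem.List.pyGetD_natCast]
      simp only [List.singleton_append, List.getElem_cons_succ, List.getElem_map, List.getElem_range]
      rw [harith]
      have hm : (i + 1 + k) % cs.length < cs.length := Nat.mod_lt _ (by omega)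
      rw [List.getD_eq_getElem _ _ hm]
      by_cases hc : i + (k + 1) < cs.length
      · rw [List.getElem_append_left hc]
        congr 1
        have : i + 1 + k < cs.length := by omega
        rw [Nat.mod_eq_of_lt this]; omega
      · rw [List.getElem_append_right (by omega)]
        congr 1
        rw [Nat.mod_eq_sub_mod (by omega), Nat.mod_eq_of_lt (by omega)]
        omega

lemma ports_eq (s : String) : circ_numbers s = circ_numbers_alt s := by
  unfold circ_numbers circ_numbers_alt
  rw [PySem.List.foldl_append_singleton_eq_map, PySem.List.pyRange_zero_natCast, List.map_map,
    List.nil_append]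
  apply List.map_congr_left
  intro i hi
  have hi' : i < s.toList.length := List.mem_range.mp hi
  simp only [Function.comp]
  rw [inner_eq _ _ hi', PySem.List.slice_natCast_add]

-- ===== VERDICT (by name: the statement is the Claim_ definition above) =====
theorem circ_numbers_spec : Claim_equal_circ_numbers := by
  intro s _
  exact ports_eq s
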